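-- pv_equiv track=rewrite | github.com/lelushaz/pp2 | lab3/classes/func/ex8.py | has007
-- ===== SOURCE A (Python) =====
-- def has007(num):
--     n = []
--     for x in num:
--         if x == 0:
--             n.append(x)
--         elif x == 7:
--                 n.append(x)
--     for i in range(len(n)-2):
--         if n[i] == 0 and n[i+1] == 0 and n[i+2] == 7:
--             return True
--     return False
-- ===== SOURCE B (Python) =====
-- def has007(num):
--     zeros = 0
--     for x in num:
--         if x == 0:
--             zeros += 1
--         elif x == 7:
--             if zeros >= 2:
--                 return True
--             zeros = 0
--     return False
-- ===== Notes on version B (the rewrite author's own statement) =====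
-- stated objective: simpler
-- what changed: Replaced the filter-into-a-list-then-sliding-window scan by a single pass over num that keeps only a consecutive-zeros counter (reset on 7, returning True on a 7 after >= 2 zeros), with no intermediate list.
import Mathlib
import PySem

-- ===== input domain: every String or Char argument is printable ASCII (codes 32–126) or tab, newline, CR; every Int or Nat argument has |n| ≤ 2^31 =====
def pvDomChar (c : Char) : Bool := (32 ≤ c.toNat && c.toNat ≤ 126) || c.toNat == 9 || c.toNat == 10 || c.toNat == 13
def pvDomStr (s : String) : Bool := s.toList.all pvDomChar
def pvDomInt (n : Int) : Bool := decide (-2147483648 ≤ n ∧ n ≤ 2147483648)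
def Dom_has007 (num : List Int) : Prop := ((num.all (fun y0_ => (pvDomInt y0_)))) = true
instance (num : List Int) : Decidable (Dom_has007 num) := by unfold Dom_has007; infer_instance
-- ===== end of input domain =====

-- B replaces A's filter-then-window scan by a one-pass consecutive-zeros counter (simpler, no intermediate list); return values proved equal.
-- ===== PORT A =====
-- A-side helper: the second Python loop, 'for i in range(len(n)-2): if n[i]==0 and n[i+1]==0 and n[i+2]==7: return True', as the same sliding window over n
def scan007 : List Int → Bool
  | a :: b :: c :: rest => if a = 0 && b = 0 && c = 7 then true else scan007 (b :: c :: rest)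
  | _ => false

def has007 (num : List Int) : Bool :=
  let n := num.foldl (fun acc x => if x = 0 then acc ++ [x] else if x = 7 then acc ++ [x] else acc) []
  scan007 n

-- ===== PORT B =====
-- B-side helper: the loop of Source B with its 'zeros' counter as the second argument
def altGo : List Int → Nat → Bool
  | [], _ => false
  | x :: xs, z =>
    if x = 0 then altGo xs (z + 1)
    else if x = 7 then (if 2 ≤ z then true else altGo xs 0)
    else altGo xs z

def has007_alt (num : List Int) : Bool := altGo num 0

-- ===== PRECONDITION & SPEC =====
def Spec_has007 (num : List Int) (out : Bool) : Prop := out = has007_alt num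
instance (num : List Int) (out : Bool) : Decidable (Spec_has007 num out) := by unfold Spec_has007; infer_instance

-- ===== CLAIM (what is proved, stated in full; the proofs are below) =====
def Claim_equal_has007 : Prop := ∀ (num : List Int), Dom_has007 num → Spec_has007 num (has007 num)

-- ===== LEMMAS AND PROOFS =====

lemma foldl_keep07 (num : List Int) (acc : List Int) :
    num.foldl (fun acc x => if x = 0 then acc ++ [x] else if x = 7 then acc ++ [x] else acc) acc
      = acc ++ num.filter (fun x => x == 0 || x == 7) := by
  induction num generalizing acc with
  | nil => simp
  | cons x rest ih =>
    by_cases h0 : x = 0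
    · simp [h0, ih]
    · by_cases h7 : x = 7 <;> simp [h0, h7, ih]

lemma scan007_cons7 (l : List Int) : scan007 (7 :: l) = scan007 l := by
  cases l with
  | nil => rfl
  | cons b t => cases t with
    | nil => rfl
    | cons c r => simp [scan007]

lemma scan007_cons07 (l : List Int) : scan007 (0 :: 7 :: l) = scan007 l := by
  cases l with
  | nil => rfl
  | cons c r => rw [show scan007 (0 :: 7 :: c :: r) = scan007 (7 :: c :: r) by simp [scan007]]; exact scan007_cons7 _

lemma scan007_no7 : ∀ (l : List Int), (7 : Int) ∉ l → scan007 l = false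
  | [], _ => rfl
  | [_], _ => rfl
  | [_, _], _ => rfl
  | a :: b :: c :: r, h => by
    have hc : c ≠ 7 := by simp at h; tauto
    have := scan007_no7 (b :: c :: r) (by simp at h ⊢; tauto)
    simp [scan007, hc, this]

lemma scan007_rep7 : ∀ (k : Nat) (F : List Int),
    scan007 (List.replicate (k + 2) 0 ++ 7 :: F) = true := by
  intro k
  induction k with
  | zero => intro F; simp [scan007]
  | succ j ih =>
    intro F
    have : List.replicate (j + 1 + 2) (0:Int) ++ 7 :: F
        = 0 :: (List.replicate (j + 2) (0:Int) ++ 7 :: F) := by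
      simp [List.replicate_succ]
    rw [this]
    cases j with
    | zero => simp [scan007, ih]
    | succ m =>
      have h2 : List.replicate (m + 1 + 2) (0:Int) ++ 7 :: F
          = 0 :: 0 :: (List.replicate (m + 1) (0:Int) ++ 7 :: F) := by
        simp [List.replicate_succ]
      rw [h2, show scan007 (0 :: (0 :: 0 :: (List.replicate (m+1) (0:Int) ++ 7 :: F)))
          = scan007 (0 :: 0 :: (List.replicate (m+1) (0:Int) ++ 7 :: F)) by simp [scan007]]
      rw [← h2, ih]

lemma altGo_scan (num : List Int) : ∀ (z : Nat),
    altGo num z = scan007 (List.replicate z 0 ++ num.filter (fun x => x == 0 || x == 7)) := by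
  induction num with
  | nil =>
    intro z
    simp only [List.filter_nil, List.append_nil, altGo]
    exact (scan007_no7 _ (by simp)).symm
  | cons x rest ih =>
    intro z
    by_cases h0 : x = 0
    · have : List.replicate z (0:Int) ++ 0 :: rest.filter (fun x => x == 0 || x == 7)
          = List.replicate (z + 1) (0:Int) ++ rest.filter (fun x => x == 0 || x == 7) := by
        simp [List.replicate_succ']
      simp [h0, altGo, ih, this]
    · by_cases h7 : x = 7
      · by_cases hz : 2 ≤ z
        · obtain ⟨k, hk⟩ : ∃ k, z = k + 2 := ⟨z - 2, by omega⟩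
          simp [h7, h0, altGo, hz, hk, scan007_rep7]
        · interval_cases z
          · simp [h7, altGo, ih, scan007_cons7]
          · simp [h7, altGo, ih, scan007_cons07]
      · simp [h0, h7, altGo, ih]

-- ===== VERDICT (by name: the statement is the Claim_ definition above) =====
theorem has007_spec : Claim_equal_has007 := by
  intro num _
  show has007 num = has007_alt num
  rw [has007, has007_alt, foldl_keep07, altGo_scan num 0]
  simp
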